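-- pv_equiv track=rewrite | github.com/margauxtornqvist/KernelMethods_2021_DataChallenge | kernels.py | InnerProduct_Spectrum
-- ===== SOURCE A (Python) =====
-- def sub_string_dict(s,kmer_size):
--     """
--     Retrieves a dictionary which contains the occurence of each substrings of length k contained in the string S
--     Parameters:
--       s: string
--       kmer_size: int, length of the substring to look ocurrences for
--     """
--     # substring dictionary
--     ss_dict = {}
--     for i in range(len(s)-kmer_size):
--         sub_string = s[i:i+kmer_size]
--         ss_dict[sub_string] = ss_dict.setdefault(sub_string, 0) + 1
--     return ss_dict
--
-- def InnerProduct_Spectrum(string_i,string_j,kmer_size):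
--     """
--     Computes the inner product between two strings i and j w.r.t the spectrum kernel
--     K(x_i,x_j) = SUM_u(Phi_u(x_i),Phi_u(x_j) for u in A^k), A^k all substrings of x_i and x_j
--     Parameters:
--       string_i: string
--       string_j: string
--       kmer_size: int, length of the substring to look ocurrences for
--     """
--     dic_i = sub_string_dict(string_i,kmer_size)
--     dic_j = sub_string_dict(string_j,kmer_size)
--
--     # common substrings (intersection)
--     inter_ss = set(dic_i.keys()) & set(dic_j.keys())
--     K = 0
--     # sum over all common substrings
--     for ss in inter_ss:
--         K += dic_i[ss]*dic_j[ss]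
--     return K
-- ===== SOURCE B (Python) =====
-- def InnerProduct_Spectrum(string_i, string_j, kmer_size):
--     # Build the k-mer counter of string_i once, then stream string_j's k-mers
--     # against it; no second dict and no key-set intersection.
--     dic_i = {}
--     for i in range(len(string_i) - kmer_size):
--         ss = string_i[i:i + kmer_size]
--         dic_i[ss] = dic_i.get(ss, 0) + 1
--     K = 0
--     for i in range(len(string_j) - kmer_size):
--         K += dic_i.get(string_j[i:i + kmer_size], 0)
--     return K
-- ===== Notes on version B (the rewrite author's own statement) =====
-- stated objective: simpler
-- what changed: B builds only string_i's k-mer counter and streams string_j's k-mers against it, accumulating dic_i.get(ss, 0), instead of building a second dict and summing over the intersection of key sets.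
import Mathlib
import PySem

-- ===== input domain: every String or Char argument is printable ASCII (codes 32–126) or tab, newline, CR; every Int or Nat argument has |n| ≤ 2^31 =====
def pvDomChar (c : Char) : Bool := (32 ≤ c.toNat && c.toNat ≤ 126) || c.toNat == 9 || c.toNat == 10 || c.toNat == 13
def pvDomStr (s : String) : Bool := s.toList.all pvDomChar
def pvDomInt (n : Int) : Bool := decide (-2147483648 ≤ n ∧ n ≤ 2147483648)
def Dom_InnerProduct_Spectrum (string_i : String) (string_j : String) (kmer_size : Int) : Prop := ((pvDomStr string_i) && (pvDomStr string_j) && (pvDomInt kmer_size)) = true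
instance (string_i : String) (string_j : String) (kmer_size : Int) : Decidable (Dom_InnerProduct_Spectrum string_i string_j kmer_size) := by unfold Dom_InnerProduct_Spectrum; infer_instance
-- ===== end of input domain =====

-- B keeps only string_i's k-mer counter and streams string_j's k-mers against it,
-- replacing A's second dict and key-set intersection; objective: simpler.


-- ===== PORT A =====
-- helper of A: ss_dict[sub_string] = ss_dict.setdefault(sub_string, 0) + 1 over range(len(s)-kmer_size)
def sub_string_dict (s : List Char) (kmer_size : Int) : PySem.Dict (List Char) Int :=
  (PySem.List.pyRange 0 ((s.length : Int) - kmer_size) 1).foldl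
    (fun ss_dict i =>
      let sub_string := PySem.List.slice s (some i) (some (i + kmer_size))
      let d' := ss_dict.setdefault sub_string 0
      d'.insert sub_string (d'.getD sub_string 0 + 1))
    PySem.Dict.empty

def InnerProduct_Spectrum (string_i : String) (string_j : String) (kmer_size : Int) : Int :=
  let dic_i := sub_string_dict string_i.toList kmer_size
  let dic_j := sub_string_dict string_j.toList kmer_size
  -- set(dic_i.keys()) & set(dic_j.keys()); Python's hash iteration order is not modelled,
  -- but the sum below does not depend on the iteration order
  let inter_ss := PySem.Set.inter (PySem.Set.ofList dic_i.keys) (PySem.Set.ofList dic_j.keys)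
  -- dic_i[ss] / dic_j[ss]: every ss ∈ inter_ss lies in both key sets, so getD is exact (no KeyError)
  inter_ss.foldl (fun K ss => K + dic_i.getD ss 0 * dic_j.getD ss 0) 0

-- ===== PORT B =====
def InnerProduct_Spectrum_alt (string_i : String) (string_j : String) (kmer_size : Int) : Int :=
  let dic_i :=
    (PySem.List.pyRange 0 ((string_i.toList.length : Int) - kmer_size) 1).foldl
      (fun d i =>
        let ss := PySem.List.slice string_i.toList (some i) (some (i + kmer_size))
        d.insert ss (d.getD ss 0 + 1))
      PySem.Dict.empty
  (PySem.List.pyRange 0 ((string_j.toList.length : Int) - kmer_size) 1).foldl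
    (fun K i => K + dic_i.getD (PySem.List.slice string_j.toList (some i) (some (i + kmer_size))) 0)
    0

-- ===== PRECONDITION & SPEC =====
def Spec_InnerProduct_Spectrum (string_i : String) (string_j : String) (kmer_size : Int) (out : Int) : Prop := out = InnerProduct_Spectrum_alt string_i string_j kmer_size
instance (string_i : String) (string_j : String) (kmer_size : Int) (out : Int) : Decidable (Spec_InnerProduct_Spectrum string_i string_j kmer_size out) := by unfold Spec_InnerProduct_Spectrum; infer_instance

-- ===== CLAIM (what is proved, stated in full; the proofs are below) =====
def Claim_equal_InnerProduct_Spectrum : Prop := ∀ (string_i : String) (string_j : String) (kmer_size : Int), Dom_InnerProduct_Spectrum string_i string_j kmer_size → Spec_InnerProduct_Spectrum string_i string_j kmer_size (InnerProduct_Spectrum string_i string_j kmer_size)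

-- ===== LEMMAS AND PROOFS =====

-- the list of k-mers one pass over s visits (both programs visit exactly this list)
def pvKmers (s : List Char) (kmer_size : Int) : List (List Char) :=
  (PySem.List.pyRange 0 ((s.length : Int) - kmer_size) 1).map
    (fun i => PySem.List.slice s (some i) (some (i + kmer_size)))

-- A's loop body on one k-mer
def stepA (d : PySem.Dict (List Char) Int) (x : List Char) : PySem.Dict (List Char) Int :=
  let d' := d.setdefault x 0
  d'.insert x (d'.getD x 0 + 1)

theorem getD_stepA (d : PySem.Dict (List Char) Int) (x v : List Char) :
    (stepA d x).getD v 0 = if v = x then d.getD v 0 + 1 else d.getD v 0 := by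
  unfold stepA
  rw [PySem.Dict.getD_insert]
  by_cases h : v = x
  · subst h; simp [PySem.Dict.getD_setdefault_self]
  · simp [h, PySem.Dict.getD_eq_get?_getD, PySem.Dict.get?_setdefault_of_ne]

theorem getD_foldA (f : Int → List Char) (l : List Int) (d : PySem.Dict (List Char) Int)
    (v : List Char) :
    (l.foldl (fun d i => stepA d (f i)) d).getD v 0 = d.getD v 0 + (l.map f).count v := by
  induction l generalizing d with
  | nil => simp
  | cons x xs ih =>
    simp only [List.foldl_cons, ih, getD_stepA, List.map_cons, List.count_cons]
    by_cases h : v = f x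
    · simp only [h, beq_self_eq_true, if_true]
      push_cast
      ring
    · have h' : ¬f x = v := fun hh => h hh.symm
      simp [h, h']

theorem contains_stepA (d : PySem.Dict (List Char) Int) (x v : List Char) :
    (stepA d x).contains v = (v == x || d.contains v) := by
  unfold stepA
  rw [PySem.Dict.contains_insert, PySem.Dict.contains_setdefault]
  cases h : (v == x) <;> simp

theorem mem_keys_foldA (f : Int → List Char) (l : List Int) (d : PySem.Dict (List Char) Int)
    (v : List Char) :
    v ∈ (l.foldl (fun d i => stepA d (f i)) d).keys ↔ v ∈ d.keys ∨ v ∈ l.map f := by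
  induction l generalizing d with
  | nil => simp
  | cons x xs ih =>
    simp only [List.foldl_cons, ih, ← PySem.Dict.contains_iff_mem_keys, contains_stepA,
      List.map_cons, List.mem_cons]
    simp [Bool.or_eq_true, beq_iff_eq]
    tauto

theorem getD_sub_string_dict (s : List Char) (k : Int) (v : List Char) :
    (sub_string_dict s k).getD v 0 = ((pvKmers s k).count v : Int) := by
  have h := getD_foldA (fun i => PySem.List.slice s (some i) (some (i + k)))
    (PySem.List.pyRange 0 ((s.length : Int) - k) 1) PySem.Dict.empty v
  exact h.trans (by simp [pvKmers])

theorem mem_keys_sub_string_dict (s : List Char) (k : Int) (v : List Char) :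
    v ∈ (sub_string_dict s k).keys ↔ v ∈ pvKmers s k := by
  have h := mem_keys_foldA (fun i => PySem.List.slice s (some i) (some (i + k)))
    (PySem.List.pyRange 0 ((s.length : Int) - k) 1) PySem.Dict.empty v
  exact h.trans (by simp [pvKmers])

-- B's dict is the plain counter of string_i's k-mers
theorem getD_dictB (s : List Char) (k : Int) (v : List Char) :
    ((PySem.List.pyRange 0 ((s.length : Int) - k) 1).foldl
        (fun d i =>
          d.insert (PySem.List.slice s (some i) (some (i + k)))
            (d.getD (PySem.List.slice s (some i) (some (i + k))) 0 + 1))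
        PySem.Dict.empty).getD v 0 = ((pvKmers s k).count v : Int) := by
  have h : (PySem.List.pyRange 0 ((s.length : Int) - k) 1).foldl
        (fun d i =>
          d.insert (PySem.List.slice s (some i) (some (i + k)))
            (d.getD (PySem.List.slice s (some i) (some (i + k))) 0 + 1))
        (PySem.Dict.empty : PySem.Dict (List Char) Int)
      = (pvKmers s k).foldl (fun d ss => d.insert ss (d.getD ss 0 + 1))
          (PySem.Dict.empty : PySem.Dict (List Char) Int) := by
    simp [pvKmers, List.foldl_map]
  refine (congrArg (fun d => PySem.Dict.getD d v 0) h).trans ?_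
  simp only [PySem.Dict.getD_foldl_insert_add_one]
  simp

-- A's result, zeta-reduced and with the dict lookups replaced by k-mer counts
theorem a_eq (string_i string_j : String) (kmer_size : Int) :
    InnerProduct_Spectrum string_i string_j kmer_size
      = ((PySem.Set.inter (PySem.Set.ofList (sub_string_dict string_i.toList kmer_size).keys)
            (PySem.Set.ofList (sub_string_dict string_j.toList kmer_size).keys)).map
          (fun v => ((pvKmers string_i.toList kmer_size).count v : Int)
            * ((pvKmers string_j.toList kmer_size).count v : Int))).sum := by
  show (PySem.Set.inter (PySem.Set.ofList (sub_string_dict string_i.toList kmer_size).keys)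
        (PySem.Set.ofList (sub_string_dict string_j.toList kmer_size).keys)).foldl
      (fun K ss => K + (sub_string_dict string_i.toList kmer_size).getD ss 0
        * (sub_string_dict string_j.toList kmer_size).getD ss 0) 0 = _
  rw [PySem.List.foldl_add]
  rw [show (fun ss => (sub_string_dict string_i.toList kmer_size).getD ss 0
        * (sub_string_dict string_j.toList kmer_size).getD ss 0)
      = (fun v => ((pvKmers string_i.toList kmer_size).count v : Int)
        * ((pvKmers string_j.toList kmer_size).count v : Int)) from
    funext fun ss => by rw [getD_sub_string_dict, getD_sub_string_dict]]
  rw [zero_add]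

-- B's result, zeta-reduced and with the counter lookups replaced by k-mer counts
theorem b_eq (string_i string_j : String) (kmer_size : Int) :
    InnerProduct_Spectrum_alt string_i string_j kmer_size
      = ((pvKmers string_j.toList kmer_size).map
          (fun v => ((pvKmers string_i.toList kmer_size).count v : Int))).sum := by
  show (PySem.List.pyRange 0 ((string_j.toList.length : Int) - kmer_size) 1).foldl
      (fun K i => K
        + ((PySem.List.pyRange 0 ((string_i.toList.length : Int) - kmer_size) 1).foldl
            (fun d i =>
              d.insert (PySem.List.slice string_i.toList (some i) (some (i + kmer_size)))
                (d.getD (PySem.List.slice string_i.toList (some i) (some (i + kmer_size))) 0 + 1))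
            (PySem.Dict.empty : PySem.Dict (List Char) Int)).getD
            (PySem.List.slice string_j.toList (some i) (some (i + kmer_size))) 0) 0 = _
  rw [show (fun (K : Int) i => K
        + ((PySem.List.pyRange 0 ((string_i.toList.length : Int) - kmer_size) 1).foldl
            (fun d i =>
              d.insert (PySem.List.slice string_i.toList (some i) (some (i + kmer_size)))
                (d.getD (PySem.List.slice string_i.toList (some i) (some (i + kmer_size))) 0 + 1))
            (PySem.Dict.empty : PySem.Dict (List Char) Int)).getD
            (PySem.List.slice string_j.toList (some i) (some (i + kmer_size))) 0)
      = (fun (K : Int) i => K + ((pvKmers string_i.toList kmer_size).count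
          (PySem.List.slice string_j.toList (some i) (some (i + kmer_size))) : Int)) from
    funext fun K => funext fun i => by rw [getD_dictB]]
  rw [PySem.List.foldl_add]
  rw [zero_add]
  simp only [pvKmers, List.map_map]
  rfl

-- the order-independent heart: summing count_i·count_j over the (nodup) common k-mers
-- equals streaming string_j's k-mers against string_i's counter
theorem sum_inter_eq (ki kj inter : List (List Char)) (hnd : inter.Nodup)
    (hmem : ∀ v, v ∈ inter ↔ v ∈ ki ∧ v ∈ kj) :
    (inter.map (fun v => ((ki.count v : Int)) * ((kj.count v : Int)))).sum
      = (kj.map (fun v => ((ki.count v : Int)))).sum := by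
  rw [← List.sum_toFinset _ hnd,
      Finset.sum_list_map_count kj (fun v => ((ki.count v : Int)))]
  have hsub : inter.toFinset ⊆ kj.toFinset := by
    intro v hv
    simp only [List.mem_toFinset] at *
    exact ((hmem v).1 hv).2
  rw [← Finset.sum_subset hsub (by
    intro x hx hxn
    simp only [List.mem_toFinset] at hx hxn
    have : x ∉ ki := fun hki => hxn ((hmem x).2 ⟨hki, hx⟩)
    simp [List.count_eq_zero_of_not_mem this])]
  apply Finset.sum_congr rfl
  intro x hx
  rw [nsmul_eq_mul]; ring_nf
  congr 1
  simp only [List.count_eq_countP, beq_eq_decide]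

theorem InnerProduct_Spectrum_spec' (string_i string_j : String) (kmer_size : Int) :
    InnerProduct_Spectrum string_i string_j kmer_size
      = InnerProduct_Spectrum_alt string_i string_j kmer_size := by
  rw [a_eq, b_eq]
  apply sum_inter_eq
  · exact PySem.Set.nodup_inter _ _ (PySem.Set.nodup_ofList _)
  · intro v
    rw [PySem.Set.mem_inter]
    simp only [PySem.Set.mem_ofList, mem_keys_sub_string_dict]

-- ===== VERDICT (by name: the statement is the Claim_ definition above) =====
theorem InnerProduct_Spectrum_spec : Claim_equal_InnerProduct_Spectrum := by
  intro si sj k _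
  exact InnerProduct_Spectrum_spec' si sj k
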